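-- pv_equiv track=rewrite | github.com/kimkihyun1/TIL | CodingTest/2405/240516.py | solution
-- ===== SOURCE A (Python) =====
-- def solution(answers):
--     answer = [0, 0, 0]
--     result = []
--     p1 = [1, 2, 3, 4, 5]
--     p2 = [2, 1, 2, 3, 2, 4, 2, 5]
--     p3 = [3, 3, 1, 1, 2, 2, 4, 4, 5, 5]
--
--     for i, ans in enumerate(answers):
--         if ans == p1[i % len(p1)]:
--             answer[0] += 1
--         if ans == p2[i % len(p2)]:
--             answer[1] += 1
--         if ans == p3[i % len(p3)]:
--             answer[2] += 1
--
--     for i, cnt in enumerate(answer):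
--         if cnt == max(answer):
--             result.append(i + 1)
--
--     return result
-- ===== SOURCE B (Python) =====
-- def _score(answers, pattern):
--     # one pass per pattern, consuming the pattern as a queue and refilling it
--     s = 0
--     rem = ()
--     for a in answers:
--         if not rem:
--             rem = pattern
--         if a == rem[0]:
--             s += 1
--         rem = rem[1:]
--     return s
--
--
-- def solution(answers):
--     patterns = ((1, 2, 3, 4, 5),
--                 (2, 1, 2, 3, 2, 4, 2, 5),
--                 (3, 3, 1, 1, 2, 2, 4, 4, 5, 5))
--     scores = [_score(answers, p) for p in patterns]
--     m = max(scores)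
--     return [i + 1 for i, s in enumerate(scores) if s == m]
-- ===== Notes on version B (the rewrite author's own statement) =====
-- stated objective: alternative
-- what changed: Replaces A's single interleaved scan (one loop testing all three patterns per element via modulo indexing) with three independent passes, each consuming its pattern as a refilling queue with no index arithmetic, then selecting the maxima from the score list.
import Mathlib
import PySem

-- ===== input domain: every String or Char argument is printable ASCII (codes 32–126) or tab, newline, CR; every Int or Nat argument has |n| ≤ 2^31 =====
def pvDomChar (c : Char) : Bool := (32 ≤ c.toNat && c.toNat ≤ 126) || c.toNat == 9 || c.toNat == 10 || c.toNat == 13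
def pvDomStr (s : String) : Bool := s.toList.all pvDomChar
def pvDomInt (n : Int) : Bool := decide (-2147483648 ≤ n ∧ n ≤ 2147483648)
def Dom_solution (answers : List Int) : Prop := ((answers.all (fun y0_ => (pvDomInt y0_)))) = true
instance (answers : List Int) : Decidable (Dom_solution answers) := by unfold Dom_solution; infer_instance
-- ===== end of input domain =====

-- B replaces A's single interleaved modulo-indexed scan by three independent
-- queue-consuming passes (objective: alternative decomposition, same cost).

-- ===== PORT A =====
def pA1 : List Int := [1, 2, 3, 4, 5]
def pA2 : List Int := [2, 1, 2, 3, 2, 4, 2, 5]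
def pA3 : List Int := [3, 3, 1, 1, 2, 2, 4, 4, 5, 5]

-- the 'for i, ans in enumerate(answers)' loop with its three counters;
-- p[i % len(p)] is always in range, so getD is exact here
def loopA : List Int → Nat → (Int × Int × Int) → (Int × Int × Int)
  | [], _, acc => acc
  | a :: rest, i, (c1, c2, c3) =>
      loopA rest (i + 1)
        ((if a = pA1.getD (i % pA1.length) 0 then c1 + 1 else c1),
         (if a = pA2.getD (i % pA2.length) 0 then c2 + 1 else c2),
         (if a = pA3.getD (i % pA3.length) 0 then c3 + 1 else c3))

def solution (answers : List Int) : List Int :=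
  let ans := loopA answers 0 (0, 0, 0)
  let answer : List Int := [ans.1, ans.2.1, ans.2.2]
  -- 'max(answer)' on the nonempty 3-list: max?.getD 0 is exact
  (PySem.List.enumerate answer 0).foldl
    (fun r ic =>
      if ic.2 = (PySem.List.max? answer (fun x => x)).getD 0 then r ++ [ic.1 + 1] else r) []

-- ===== PORT B =====
-- _score: consume the pattern as a queue 'rem', refilling it when empty;
-- after the refill rem is nonempty, so headD 0 is exact
def cycScore (orig : List Int) : List Int → List Int → Int
  | [], _ => 0
  | a :: rest, p =>
      let p' := if p.isEmpty then orig else p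
      (if a = p'.headD 0 then 1 else 0) + cycScore orig rest p'.tail

def solution_alt (answers : List Int) : List Int :=
  let patterns : List (List Int) :=
    [[1, 2, 3, 4, 5], [2, 1, 2, 3, 2, 4, 2, 5], [3, 3, 1, 1, 2, 2, 4, 4, 5, 5]]
  let scores := patterns.map (fun p => cycScore p answers [])
  -- 'max(scores)' on the nonempty 3-list: max?.getD 0 is exact
  let m := (PySem.List.max? scores (fun x => x)).getD 0
  ((PySem.List.enumerate scores 0).filter (fun is => is.2 == m)).map (fun is => is.1 + 1)

-- ===== PRECONDITION & SPEC =====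
def Spec_solution (answers : List Int) (out : List Int) : Prop := out = solution_alt answers
instance (answers : List Int) (out : List Int) : Decidable (Spec_solution answers out) := by unfold Spec_solution; infer_instance

-- ===== CLAIM (what is proved, stated in full; the proofs are below) =====
def Claim_equal_solution : Prop := ∀ (answers : List Int), Dom_solution answers → Spec_solution answers (solution answers)

-- ===== LEMMAS AND PROOFS =====

lemma cyc_nil_eq (orig l : List Int) : cycScore orig l [] = cycScore orig l orig := by
  cases l with
  | nil => rfl
  | cons a rest =>
      simp only [cycScore, List.isEmpty_nil, if_true]
      cases h : orig.isEmpty <;> simp_all [List.isEmpty_iff]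

lemma cyc_step (orig : List Int) (a : Int) (l : List Int) (k : Nat) (hk : k < orig.length) :
    cycScore orig (a :: l) (orig.drop k) =
      (if a = orig.getD k 0 then 1 else 0) +
        cycScore orig l (orig.drop ((k + 1) % orig.length)) := by
  have hne : ¬ (orig.drop k).isEmpty := by
    simp [List.isEmpty_iff, List.drop_eq_nil_iff]; omega
  simp only [cycScore, hne, if_false, Bool.false_eq_true]
  have hhd : (orig.drop k).headD 0 = orig.getD k 0 := by
    simp [List.headD_eq_head?_getD, List.head?_drop, List.getD_eq_getElem?_getD]
  have htl : (orig.drop k).tail = orig.drop (k + 1) := by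
    simp [List.tail_drop]
  rw [hhd, htl]
  rcases Nat.lt_or_ge (k + 1) orig.length with h | h
  · rw [Nat.mod_eq_of_lt h]
  · have hlen : k + 1 = orig.length := by omega
    rw [hlen, Nat.mod_self, List.drop_length, List.drop_zero, cyc_nil_eq]

lemma loop_eq (l : List Int) : ∀ (i : Nat) (c1 c2 c3 : Int),
    loopA l i (c1, c2, c3) =
      (c1 + cycScore pA1 l (pA1.drop (i % 5)),
       c2 + cycScore pA2 l (pA2.drop (i % 8)),
       c3 + cycScore pA3 l (pA3.drop (i % 10))) := by
  induction l with
  | nil => intro i c1 c2 c3; simp [loopA, cycScore]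
  | cons a rest ih =>
      intro i c1 c2 c3
      have h1 := cyc_step pA1 a rest (i % 5) (by simp [pA1]; omega)
      have h2 := cyc_step pA2 a rest (i % 8) (by simp [pA2]; omega)
      have h3 := cyc_step pA3 a rest (i % 10) (by simp [pA3]; omega)
      have e1 : pA1.length = 5 := by simp [pA1]
      have e2 : pA2.length = 8 := by simp [pA2]
      have e3 : pA3.length = 10 := by simp [pA3]
      rw [e1] at h1; rw [e2] at h2; rw [e3] at h3
      rw [show (i % 5 + 1) % 5 = (i + 1) % 5 from by omega] at h1
      rw [show (i % 8 + 1) % 8 = (i + 1) % 8 from by omega] at h2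
      rw [show (i % 10 + 1) % 10 = (i + 1) % 10 from by omega] at h3
      simp only [loopA, ih, h1, h2, h3, e1, e2, e3]
      refine Prod.ext ?_ (Prod.ext ?_ ?_) <;> dsimp only <;> split_ifs <;> ring

theorem solution_eq_alt (answers : List Int) : solution answers = solution_alt answers := by
  unfold solution solution_alt
  rw [loop_eq]
  have b1 : cycScore [1, 2, 3, 4, 5] answers [] = cycScore pA1 answers (pA1.drop (0 % 5)) := by
    rw [cyc_nil_eq]; simp [pA1]
  have b2 : cycScore [2, 1, 2, 3, 2, 4, 2, 5] answers [] =
      cycScore pA2 answers (pA2.drop (0 % 8)) := by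
    rw [cyc_nil_eq]; simp [pA2]
  have b3 : cycScore [3, 3, 1, 1, 2, 2, 4, 4, 5, 5] answers [] =
      cycScore pA3 answers (pA3.drop (0 % 10)) := by
    rw [cyc_nil_eq]; simp [pA3]
  simp only [List.map, b1, b2, b3, zero_add]
  set s1 := cycScore pA1 answers (pA1.drop (0 % 5))
  set s2 := cycScore pA2 answers (pA2.drop (0 % 8))
  set s3 := cycScore pA3 answers (pA3.drop (0 % 10))
  set m := (PySem.List.max? [s1, s2, s3] (fun x => x)).getD 0 with hm
  clear hm
  simp only [PySem.List.enumerate_cons, PySem.List.enumerate_nil, List.foldl,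
    List.filter_cons, List.filter_nil, beq_iff_eq]
  split_ifs <;> simp

-- ===== VERDICT (by name: the statement is the Claim_ definition above) =====
theorem solution_spec : Claim_equal_solution := by
  intro answers _
  exact solution_eq_alt answers
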